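-- pv_equiv track=rewrite | github.com/paiv/everybody-codes | 2024/q10.py | scan1
-- ===== SOURCE A (Python) =====
-- def scan1(data):
--     lines = data.strip().splitlines()
--     y, x = 0, 0
--     while y < len(lines):
--         x = 0
--         found = None
--         while x < len(lines[y]):
--             if lines[y][x] == '*':
--                 yield (lines, x, y)
--                 found = x
--                 x += 8
--             else:
--                 x += 1
--         y += 8 if found is not None else 1
-- ===== SOURCE B (Python) =====
-- def scan1(data):
--     lines = data.strip().splitlines()
--     y = 0
--     while y < len(lines):
--         stars = [i for i, c in enumerate(lines[y]) if c == '*']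
--         next_allowed = 0
--         for i in stars:
--             if i >= next_allowed:
--                 yield (lines, i, y)
--                 next_allowed = i + 8
--         y += 8 if stars else 1
-- ===== Notes on version B (the rewrite author's own statement) =====
-- stated objective: alternative
-- what changed: Replaces A's character-stepping inner while-loop (advancing by 1 or jumping by 8 past a yielded star) with building each row's star-column index list once via an enumerate comprehension and a greedy filtering pass over those indices with a next_allowed threshold.
import Mathlib
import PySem

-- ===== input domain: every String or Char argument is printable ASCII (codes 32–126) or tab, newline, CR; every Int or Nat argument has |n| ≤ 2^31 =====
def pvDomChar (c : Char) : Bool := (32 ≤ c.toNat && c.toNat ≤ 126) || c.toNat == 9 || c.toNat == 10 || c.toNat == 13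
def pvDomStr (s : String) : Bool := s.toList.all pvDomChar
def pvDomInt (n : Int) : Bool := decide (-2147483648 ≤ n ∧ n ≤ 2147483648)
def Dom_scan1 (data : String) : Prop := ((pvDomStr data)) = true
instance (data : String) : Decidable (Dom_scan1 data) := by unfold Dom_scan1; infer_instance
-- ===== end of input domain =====

-- B replaces A's character-by-character inner while-loop with building each row's star-column
-- list once and a greedy filtering pass over it (objective: alternative decomposition).
-- Both Pythons are generators; the ports return the list of yielded tuples.

-- ===== PORT A =====
-- inner while-loop of A: scan columns from x, yielding star positions and jumping by 8;
-- Python's `found` is only ever tested against None, so it is ported as a Bool.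
def scan1Inner (cs : List Char) (x : Nat) : List Int × Bool :=
  if h : x < cs.length then
    if cs[x] = '*' then
      let r := scan1Inner cs (x + 8)
      ((x : Int) :: r.1, true)
    else scan1Inner cs (x + 1)
  else ([], false)
termination_by cs.length - x
decreasing_by all_goals omega

-- outer while-loop of A over rows
def scan1Outer (lines : List String) (y : Nat) : List (List String × Int × Int) :=
  if h : y < lines.length then
    let r := scan1Inner (lines[y].toList) 0
    r.1.map (fun x => (lines, x, (y : Int))) ++
      scan1Outer lines (y + if r.2 then 8 else 1)
  else []
termination_by lines.length - y
decreasing_by split <;> omega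

def scan1 (data : String) : List (List String × Int × Int) :=
  scan1Outer (PySem.Str.splitlines (PySem.Str.strip data)) 0

-- ===== PORT B =====
-- stars = [i for i, c in enumerate(lines[y]) if c == '*']
def starCols (cs : List Char) : List Int :=
  ((PySem.List.enumerate cs 0).filter (fun p => p.2 == '*')).map (fun p => p.1)

-- greedy emission: keep next_allowed, emit i when i >= next_allowed, then next_allowed = i+8
def greedy : List Int → Int → List Int
  | [], _ => []
  | i :: rest, na => if na ≤ i then i :: greedy rest (i + 8) else greedy rest na

def scan1AltOuter (lines : List String) (y : Nat) : List (List String × Int × Int) :=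
  if h : y < lines.length then
    let stars := starCols (lines[y].toList)
    (greedy stars 0).map (fun i => (lines, i, (y : Int))) ++
      scan1AltOuter lines (y + if stars.isEmpty then 1 else 8)
  else []
termination_by lines.length - y
decreasing_by split <;> omega

def scan1_alt (data : String) : List (List String × Int × Int) :=
  scan1AltOuter (PySem.Str.splitlines (PySem.Str.strip data)) 0

-- ===== PRECONDITION & SPEC =====
def Spec_scan1 (data : String) (out : List (List String × Int × Int)) : Prop := out = scan1_alt data
instance (data : String) (out : List (List String × Int × Int)) : Decidable (Spec_scan1 data out) := by unfold Spec_scan1; infer_instance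

-- ===== CLAIM (what is proved, stated in full; the proofs are below) =====
def Claim_equal_scan1 : Prop := ∀ (data : String), Dom_scan1 data → Spec_scan1 data (scan1 data)

-- ===== LEMMAS AND PROOFS =====

theorem mem_starCols {cs : List Char} {i : Int} :
    i ∈ starCols cs ↔ ∃ (k : Nat) (h : k < cs.length), cs[k] = '*' ∧ i = (k : Int) := by
  simp only [starCols, List.mem_map, List.mem_filter, PySem.List.mem_enumerate_iff]
  constructor
  · rintro ⟨⟨a, c⟩, ⟨⟨k, hk, hp⟩, hc⟩, rfl⟩
    cases hp
    exact ⟨k, hk, by simpa using hc, by simp⟩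
  · rintro ⟨k, hk, hstar, rfl⟩
    exact ⟨((k : Int), cs[k]), ⟨⟨k, hk, by simp⟩, by simpa using hstar⟩, rfl⟩

theorem pairwise_starCols (cs : List Char) : (starCols cs).Pairwise (· < ·) := by
  have h := PySem.List.pairwise_lt_enumerate (xs := cs) (s := 0)
  exact ((h.filter _).map _ (fun a b hab => hab))

theorem greedy_filter (l : List Int) (p : Int → Bool) (na : Int)
    (h : ∀ i ∈ l, ¬ p i = true → i < na) : greedy (l.filter p) na = greedy l na := by
  induction l generalizing na with
  | nil => rfl
  | cons i rest ih =>
    by_cases hp : p i = true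
    · simp only [List.filter_cons, hp, if_pos, greedy]
      by_cases hna : na ≤ i
      · rw [if_pos hna, if_pos hna, ih _ (fun j hj hnj => lt_of_lt_of_le (h j (by simp [hj]) hnj) (by omega))]
      · rw [if_neg hna, if_neg hna, ih _ (fun j hj hnj => h j (by simp [hj]) hnj)]
    · have hlt : i < na := h i (by simp) hp
      have h2 : greedy (i :: rest) na = greedy rest na := by
        rw [greedy, if_neg (by omega)]
      rw [List.filter_cons, if_neg hp, h2, ih _ (fun j hj hnj => h j (by simp [hj]) hnj)]

theorem greedy_congr (l : List Int) (na na' : Int) (h : ∀ j ∈ l, (na ≤ j ↔ na' ≤ j)) :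
    greedy l na = greedy l na' := by
  induction l generalizing na na' with
  | nil => rfl
  | cons i rest ih =>
    by_cases hi : na ≤ i
    · have hi' : na' ≤ i := (h i (by simp)).1 hi
      rw [greedy, greedy, if_pos hi, if_pos hi']
    · have hi' : ¬ na' ≤ i := fun hc => hi ((h i (by simp)).2 hc)
      rw [greedy, greedy, if_neg hi, if_neg hi', ih _ _ (fun j hj => h j (by simp [hj]))]

theorem filter_le_of_sorted_mem {l : List Int} (hs : l.Pairwise (· < ·)) {x : Int} (hx : x ∈ l) :
    l.filter (fun i => x ≤ i) = x :: l.filter (fun i => x + 1 ≤ i) := by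
  induction l with
  | nil => cases hx
  | cons a t ih =>
    rcases List.pairwise_cons.1 hs with ⟨ha, ht⟩
    rcases List.mem_cons.1 hx with rfl | hxt
    · have h1 : List.filter (fun i => x ≤ i) t = List.filter (fun i => x + 1 ≤ i) t := by
        apply List.filter_congr
        intro j hj
        have := ha j hj
        simp only [decide_eq_decide]
        omega
      simp [h1]
    · have hax : a < x := ha x hxt
      simp only [List.filter_cons, decide_eq_true_eq]
      rw [if_neg (by omega), if_neg (by omega)]
      exact ih ht hxt

theorem scan1Inner_eq (cs : List Char) (x : Nat) :
    scan1Inner cs x = (greedy ((starCols cs).filter (fun i => (x : Int) ≤ i)) x,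
      !((starCols cs).filter (fun i => (x : Int) ≤ i)).isEmpty) := by
  induction x using scan1Inner.induct cs with
  | case1 x h hstar ih =>
    -- star at x
    have hmem : (x : Int) ∈ starCols cs := mem_starCols.2 ⟨x, h, hstar, rfl⟩
    have hdec := filter_le_of_sorted_mem (pairwise_starCols cs) hmem
    rw [scan1Inner, dif_pos h, if_pos hstar]
    have h1 : greedy ((starCols cs).filter (fun i => (x : Int) + 1 ≤ i)) ((x : Int) + 8)
        = greedy ((starCols cs).filter (fun i => ((x + 8 : Nat) : Int) ≤ i)) ((x + 8 : Nat) : Int) := by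
      rw [greedy_filter _ _ _ (fun j _ hnj => by simp at hnj; omega),
          greedy_filter _ _ _ (fun j _ hnj => by simp at hnj; push_cast at hnj ⊢; omega)]
      push_cast; rfl
    rw [hdec]
    simp only [greedy, if_pos (le_refl (x : Int)), List.isEmpty_cons, Bool.not_false]
    rw [h1]
    have := ih
    rw [this]
  | case2 x h hstar ih =>
    -- no star at x
    have hcong : (starCols cs).filter (fun i => (x : Int) ≤ i)
        = (starCols cs).filter (fun i => ((x + 1 : Nat) : Int) ≤ i) := by
      apply List.filter_congr
      intro j hj
      rcases mem_starCols.1 hj with ⟨k, hk, hks, rfl⟩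
      have hne : k ≠ x := by rintro rfl; exact hstar hks
      simp only [decide_eq_decide]
      push_cast
      omega
    rw [scan1Inner, dif_pos h, if_neg hstar, hcong, ih]
    have : greedy (List.filter (fun i => decide (((x:Nat) + 1 : Int) ≤ i)) (starCols cs)) ((x + 1 : Nat) : Int)
        = greedy (List.filter (fun i => decide (((x:Nat) + 1 : Int) ≤ i)) (starCols cs)) (x : Int) := by
      apply greedy_congr
      intro j hj
      have := List.of_mem_filter hj
      simp only [decide_eq_true_eq] at this
      omega
    push_cast at this ⊢
    rw [this]
  | case3 x h =>
    have hnil : (starCols cs).filter (fun i => (x : Int) ≤ i) = [] := by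
      apply List.filter_eq_nil_iff.2
      intro j hj
      rcases mem_starCols.1 hj with ⟨k, hk, _, rfl⟩
      simp only [decide_eq_true_eq]
      omega
    rw [scan1Inner, dif_neg h, hnil]
    rfl

theorem scan1Inner_zero (cs : List Char) :
    scan1Inner cs 0 = (greedy (starCols cs) 0, !(starCols cs).isEmpty) := by
  have hself : (starCols cs).filter (fun i => (0 : Int) ≤ i) = starCols cs := by
    apply List.filter_eq_self.2
    intro j hj
    rcases mem_starCols.1 hj with ⟨k, _, _, rfl⟩
    simp
  have := scan1Inner_eq cs 0
  rw [Nat.cast_zero] at this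
  rw [this, hself]

theorem outer_eq (lines : List String) (y : Nat) :
    scan1Outer lines y = scan1AltOuter lines y := by
  induction y using scan1Outer.induct lines with
  | case1 y h r ih =>
    rw [scan1Outer, scan1AltOuter, dif_pos h, dif_pos h, scan1Inner_zero]
    simp only [show r = scan1Inner lines[y].toList 0 from rfl, scan1Inner_zero] at ih
    cases he : (starCols (lines[y].toList)).isEmpty <;>
      simp only [he, Bool.not_false, Bool.not_true, if_true] at ih ⊢ <;> simpa using ih
  | case2 y h =>
    rw [scan1Outer, scan1AltOuter, dif_neg h, dif_neg h]

-- ===== VERDICT (by name: the statement is the Claim_ definition above) =====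
theorem scan1_spec : Claim_equal_scan1 := by
  intro data _
  unfold Spec_scan1 scan1 scan1_alt
  exact outer_eq _ 0
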